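-- pv_equiv track=rewrite | github.com/hieuducnguyen/BigOCourse | 12_binary_search/4_The_Playboy_Chimp.py | lower_1
-- ===== SOURCE A (Python) =====
-- def lower_1(val_list, key):
--     if val_list[0] >= key:
--         return -1
--     start, end, mid = 0, len(val_list), 0
--     result = -1
--     while start < end:
--         mid = start + (end - start) // 2
--         if key <= val_list[mid]:
--             end = mid
--         else:
--             result = mid
--             start = mid + 1
--     return result
-- ===== SOURCE B (Python) =====
-- def lower_1(val_list, key):
--     if val_list[0] >= key:
--         return -1
--     def go(offset, seg, result):
--         if not seg:
--             return result
--         h = len(seg) // 2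
--         if key <= seg[h]:
--             return go(offset, seg[:h], result)
--         return go(offset + h + 1, seg[h + 1:], offset + h)
--     return go(0, val_list, -1)
-- ===== Notes on version B (the rewrite author's own statement) =====
-- stated objective: alternative
-- what changed: The index-pair while loop over the whole list is replaced by a structural recursion over shrinking list slices: the helper carries (offset, segment, result), probes the segment's midpoint, and recurses on the left or right slice, so no end pointer or mutable state exists.
import Mathlib
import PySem

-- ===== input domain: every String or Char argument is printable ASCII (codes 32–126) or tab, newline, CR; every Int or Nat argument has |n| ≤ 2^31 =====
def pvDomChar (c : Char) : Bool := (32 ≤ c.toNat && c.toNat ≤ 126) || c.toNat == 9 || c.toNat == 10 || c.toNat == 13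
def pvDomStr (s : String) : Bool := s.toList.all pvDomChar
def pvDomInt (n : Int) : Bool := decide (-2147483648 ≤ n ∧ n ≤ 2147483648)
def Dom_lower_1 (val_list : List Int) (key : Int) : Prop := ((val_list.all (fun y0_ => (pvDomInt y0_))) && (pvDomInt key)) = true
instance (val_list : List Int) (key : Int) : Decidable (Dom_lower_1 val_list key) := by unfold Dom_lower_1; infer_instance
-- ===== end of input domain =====

-- B replaces A's index-pair while loop by a structural recursion over shrinking list
-- slices (offset, segment, result); the midpoint probes coincide, so A = B on every
-- non-empty list.

-- ===== PORT A =====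
-- A's while loop: state (start, end, mid, result) stepped until start ≥ end; the final
-- state's result component is returned.  Measure: (end - start).toNat.
def lowerLoopA (val_list : List Int) (key : Int) : Int × Int × Int × Int → Int × Int × Int × Int
  | (start, e, mid, result) =>
    if h : start < e then
      let m := start + PySem.Int.floordiv (e - start) 2
      if key ≤ PySem.List.pyGetD val_list m 0 then
        lowerLoopA val_list key (start, m, m, result)
      else
        lowerLoopA val_list key (m + 1, e, m, m)
    else (start, e, mid, result)
  termination_by s => (s.2.1 - s.1).toNat
  decreasing_by
    · have hd : PySem.Int.floordiv (e - start) 2 = (e - start) / 2 :=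
        PySem.Int.floordiv_eq_ediv_of_pos (by omega)
      simp only [hd] at *
      omega
    · have hd : PySem.Int.floordiv (e - start) 2 = (e - start) / 2 :=
        PySem.Int.floordiv_eq_ediv_of_pos (by omega)
      simp only [hd] at *
      omega

def lower_1 (val_list : List Int) (key : Int) : Int :=
  -- val_list[0]: none = IndexError, excluded by Pre_ (val_list ≠ []); 0 is a dummy there
  match PySem.List.pyGet? val_list 0 with
  | none => 0
  | some v0 =>
    if v0 ≥ key then -1
    else
      (lowerLoopA val_list key (0, (val_list.length : Int), 0, -1)).2.2.2

-- ===== PORT B =====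
-- B's helper go(offset, seg, result): probes the segment's midpoint seg[h], h = len(seg)//2
-- (always in range, so List.getD is exact), and recurses on the slice seg[:h] or seg[h+1:].
def lowerGoB (key : Int) (offset : Int) (seg : List Int) (result : Int) : Int :=
  if hs : seg = [] then result
  else
    let h := seg.length / 2
    if key ≤ seg.getD h 0 then
      lowerGoB key offset (seg.take h) result
    else
      lowerGoB key (offset + h + 1) (seg.drop (h + 1)) (offset + h)
  termination_by seg.length
  decreasing_by
    all_goals have hp : 0 < seg.length := List.length_pos_iff.mpr hs
    · simp [List.length_take]; omega
    · simp; omega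

def lower_1_alt (val_list : List Int) (key : Int) : Int :=
  match PySem.List.pyGet? val_list 0 with
  | none => 0
  | some v0 =>
    if v0 ≥ key then -1
    else lowerGoB key 0 val_list (-1)

-- ===== PRECONDITION & SPEC =====
-- Pre_ excludes exactly the empty list, on which A's val_list[0] raises IndexError (B raises there too).
def Pre_lower_1 (val_list : List Int) (key : Int) : Prop := val_list ≠ []
instance (val_list : List Int) (key : Int) : Decidable (Pre_lower_1 val_list key) := by unfold Pre_lower_1; infer_instance

def pvWitness_lower_1 : List Int × Int := ([1, 3, 5, 7], 4)

def Spec_lower_1 (val_list : List Int) (key : Int) (out : Int) : Prop := out = lower_1_alt val_list key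
instance (val_list : List Int) (key : Int) (out : Int) : Decidable (Spec_lower_1 val_list key out) := by unfold Spec_lower_1; infer_instance

-- ===== CLAIM =====
def Claim_equal_lower_1 : Prop := ∀ (val_list : List Int) (key : Int), Dom_lower_1 val_list key → Pre_lower_1 val_list key → Spec_lower_1 val_list key (lower_1 val_list key)

-- ===== LEMMAS AND PROOFS =====

-- Invariant: when seg is the slice of val_list starting at offset (element-wise), B's
-- recursion on seg computes the result component of A's loop on (offset, offset+|seg|).
theorem goB_eq_loopA (val_list : List Int) (key : Int) :
    ∀ (n : Nat) (seg : List Int) (offset mid result : Int),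
      seg.length = n →
      0 ≤ offset →
      (∀ i : Nat, i < seg.length → seg.getD i 0 = PySem.List.pyGetD val_list (offset + i) 0) →
      lowerGoB key offset seg result
        = (lowerLoopA val_list key (offset, offset + seg.length, mid, result)).2.2.2 := by
  intro n
  induction n using Nat.strong_induction_on with
  | _ n ih =>
    intro seg offset mid result hlen hoff hcorr
    by_cases hnil : seg = []
    · subst hnil
      rw [lowerGoB, lowerLoopA]
      simp
    · have hLpos : 0 < seg.length := List.length_pos_iff.mpr hnil
      have hhlt : seg.length / 2 < seg.length := by omega
      have hlt : offset < offset + (seg.length : Int) := by omega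
      have hd : PySem.Int.floordiv (offset + (seg.length : Int) - offset) 2
          = ((seg.length / 2 : Nat) : Int) := by
        have h1 : offset + (seg.length : Int) - offset = (seg.length : Int) := by ring
        rw [h1]
        exact_mod_cast PySem.Int.floordiv_natCast seg.length 2
      have hget : PySem.List.pyGetD val_list (offset + ((seg.length / 2 : Nat) : Int)) 0
          = seg.getD (seg.length / 2) 0 := (hcorr _ hhlt).symm
      rw [lowerGoB, lowerLoopA]
      simp only [dif_neg hnil, dif_pos hlt, hd, hget]
      by_cases hk : key ≤ seg.getD (seg.length / 2) 0
      · simp only [if_pos hk]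
        have htlen : (seg.take (seg.length / 2)).length = seg.length / 2 := by
          simp [List.length_take]; omega
        have hrec := ih (seg.length / 2) (by omega) (seg.take (seg.length / 2)) offset
          (offset + ((seg.length / 2 : Nat) : Int)) result htlen hoff
          (by
            intro i hi
            rw [htlen] at hi
            have ht : (seg.take (seg.length / 2)).getD i 0 = seg.getD i 0 := by
              simp [List.getD, List.getElem?_take_of_lt hi]
            rw [ht]
            exact hcorr i (by omega))
        rw [hrec, htlen]
      · simp only [if_neg hk]
        have hdlen : (seg.drop (seg.length / 2 + 1)).length
            = seg.length - (seg.length / 2 + 1) := by simp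
        have hrec := ih (seg.length - (seg.length / 2 + 1)) (by omega)
          (seg.drop (seg.length / 2 + 1)) (offset + ((seg.length / 2 : Nat) : Int) + 1)
          (offset + ((seg.length / 2 : Nat) : Int)) (offset + ((seg.length / 2 : Nat) : Int))
          hdlen (by omega)
          (by
            intro i hi
            rw [hdlen] at hi
            have h1 : (seg.drop (seg.length / 2 + 1)).getD i 0
                = seg.getD (seg.length / 2 + 1 + i) 0 := by
              simp [List.getD, List.getElem?_drop]
            have h2 : offset + ((seg.length / 2 : Nat) : Int) + 1 + (i : Int)
                = offset + (((seg.length / 2 + 1 + i : Nat)) : Int) := by push_cast; ring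
            rw [h1, h2]
            exact hcorr (seg.length / 2 + 1 + i) (by omega))
        have heq : offset + ((seg.length / 2 : Nat) : Int) + 1
            + ((seg.drop (seg.length / 2 + 1)).length : Int) = offset + (seg.length : Int) := by
          rw [hdlen]; push_cast; omega
        rw [hrec, heq]

theorem lower_1_spec : Claim_equal_lower_1 := by
  intro val_list key _ _
  unfold Spec_lower_1 lower_1 lower_1_alt
  cases hg : PySem.List.pyGet? val_list 0 with
  | none => rfl
  | some v0 =>
    by_cases hk : v0 ≥ key
    · simp [hk]
    · simp only [if_neg hk]
      have := goB_eq_loopA val_list key val_list.length val_list 0 0 (-1) rfl le_rfl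
        (by intro i hi; simp [PySem.List.pyGetD_natCast])
      rw [this]
      simp
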